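-- pv_equiv track=rewrite | github.com/jashvira/VisGeomBench | visual_geometry_bench/datagen/topology_enumeration.py | _relabel_first_occurrence
-- ===== SOURCE A (Python) =====
-- def _relabel_first_occurrence(config: tuple[int, int, int, int]) -> tuple[int, int, int, int]:
--     """Relabel configuration to 0..k-1 in first-occurrence (left-to-right) order.
--
--     This implements the core canonicalisation: scanning left-to-right, the first
--     unseen label becomes 0, the next becomes 1, and so on.
--
--     Example: (7, 5, 7, 3) -> (0, 1, 0, 2)
--     """
--     seen = {}
--     next_label = 0
--     result = []
--     for label in config:
--         if label not in seen:
--             seen[label] = next_label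
--             next_label += 1
--         result.append(seen[label])
--     return tuple(result)
-- ===== SOURCE B (Python) =====
-- def _relabel_first_occurrence(config):
--     # The new label of config[i] is the number of positions j that are "new"
--     # (config[j] unseen so far) and lie strictly before the first occurrence
--     # of config[i].  Pure pairwise counting: no dict, no mapping table.
--     return tuple(
--         sum(1 for j in range(i)
--             if config[j] not in config[:j] and config[i] not in config[:j + 1])
--         for i in range(len(config))
--     )
-- ===== Notes on version B (the rewrite author's own statement) =====
-- stated objective: alternative
-- what changed: Replaced A's stateful dict+counter single pass by a stateless pairwise-counting formula: position i's label is the count of j<i whose value is new at j and precedes the first occurrence of config[i], computed by nested prefix scans with no mapping structure at all.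
import Mathlib
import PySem

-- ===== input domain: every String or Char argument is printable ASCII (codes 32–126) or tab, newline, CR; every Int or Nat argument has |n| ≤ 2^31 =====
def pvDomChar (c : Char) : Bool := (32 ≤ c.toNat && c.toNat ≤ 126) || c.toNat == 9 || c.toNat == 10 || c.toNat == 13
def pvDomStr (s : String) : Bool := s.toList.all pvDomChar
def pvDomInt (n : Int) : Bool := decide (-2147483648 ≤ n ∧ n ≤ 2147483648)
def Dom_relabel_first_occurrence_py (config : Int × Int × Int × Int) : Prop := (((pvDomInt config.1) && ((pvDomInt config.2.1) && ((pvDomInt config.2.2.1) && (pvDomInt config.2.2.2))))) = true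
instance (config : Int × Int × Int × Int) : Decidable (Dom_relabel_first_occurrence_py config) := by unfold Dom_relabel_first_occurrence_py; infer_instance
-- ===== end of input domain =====

-- B drops A's dict/counter machinery entirely: each position's new label is computed by a
-- pairwise counting formula over prefixes (a nested scan); objective: alternative.

-- ===== PORT A =====
-- A: one pass; state (seen : dict, next_label, result); 'label not in seen' inserts and bumps the counter
def relabel_first_occurrence_py (config : Int × Int × Int × Int) : Int × Int × Int × Int :=
  let labels : List Int := [config.1, config.2.1, config.2.2.1, config.2.2.2]
  let st := labels.foldl
    (fun (st : PySem.Dict Int Int × Int × List Int) label =>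
      let seen := st.1
      let next_label := st.2.1
      let result := st.2.2
      let seen' := if ¬ seen.contains label then seen.insert label next_label else seen
      let next' := if ¬ seen.contains label then next_label + 1 else next_label
      (seen', next', result ++ [seen'.getD label 0]))
    (PySem.Dict.empty, 0, [])
  match st.2.2 with
  | [r0, r1, r2, r3] => (r0, r1, r2, r3)
  | _ => (0, 0, 0, 0)

-- ===== PORT B =====
-- B: out_i = sum(1 for j in range(i) if config[j] not in config[:j] and config[i] not in config[:j+1]);
--    'sum(1 for … if p)' is the length of the filtered range, config[:j] is take j.
def pvRankB (labels : List Int) (i : Nat) : Int :=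
  Int.ofNat ((List.range i).filter (fun j =>
      !(labels.take j).contains (labels.getD j 0) &&
      !(labels.take (j + 1)).contains (labels.getD i 0))).length

def relabel_first_occurrence_py_alt (config : Int × Int × Int × Int) : Int × Int × Int × Int :=
  let labels : List Int := [config.1, config.2.1, config.2.2.1, config.2.2.2]
  (pvRankB labels 0, pvRankB labels 1, pvRankB labels 2, pvRankB labels 3)

-- ===== PRECONDITION & SPEC =====
def Spec_relabel_first_occurrence_py (config : Int × Int × Int × Int) (out : Int × Int × Int × Int) : Prop := out = relabel_first_occurrence_py_alt config
instance (config : Int × Int × Int × Int) (out : Int × Int × Int × Int) : Decidable (Spec_relabel_first_occurrence_py config out) := by unfold Spec_relabel_first_occurrence_py; infer_instance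

-- ===== CLAIM (what is proved, stated in full; the proofs are below) =====
def Claim_equal_relabel_first_occurrence_py : Prop := ∀ (config : Int × Int × Int × Int), Dom_relabel_first_occurrence_py config → Spec_relabel_first_occurrence_py config (relabel_first_occurrence_py config)

-- ===== LEMMAS AND PROOFS =====
theorem pv_beq_false {x y : Int} (h : ¬ x = y) : (x == y) = false := by simp [h]
theorem pv_beq_false' {x y : Int} (h : ¬ y = x) : (x == y) = false := by simp [Ne.symm h]

-- ===== VERDICT (by name: the statement is the Claim_ definition above) =====
set_option maxHeartbeats 4000000 in
theorem relabel_first_occurrence_py_spec : Claim_equal_relabel_first_occurrence_py := by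
  rintro ⟨a, b, c, d⟩ -
  show relabel_first_occurrence_py (a, b, c, d) = relabel_first_occurrence_py_alt (a, b, c, d)
  by_cases h1 : b = a <;> by_cases h2 : c = a <;> by_cases h3 : c = b <;>
    by_cases h4 : d = a <;> by_cases h5 : d = b <;> by_cases h6 : d = c <;>
    simp_all [relabel_first_occurrence_py, relabel_first_occurrence_py_alt, pvRankB,
      List.foldl, List.range_succ, List.filter_append, List.filter,
      PySem.Dict.contains_empty, PySem.Dict.getD_empty, PySem.Dict.contains_insert,
      PySem.Dict.getD_insert,
      beq_iff_eq, pv_beq_false, pv_beq_false'] <;> (try split_ifs) <;> omega
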